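-- pv_equiv track=rewrite | github.com/Apollos1301/NormMatchTrans | train_eval.py | split_tensor
-- ===== SOURCE A (Python) =====
-- def split_tensor(tensor_1, tensor_2):
--     result = []
--     start_index = 0
--
--     for length in tensor_2:
--         end_index = start_index + length
--         result.append(tensor_1[start_index:end_index])
--         start_index = end_index
--
--     return result
-- ===== SOURCE B (Python) =====
-- def split_tensor(tensor_1, tensor_2):
--     # Divide and conquer: split the length list in half, recurse on each half
--     # with the corresponding offset; slicing keeps Python's index semantics.
--     def rec(lengths, offset):
--         n = len(lengths)
--         if n == 0:
--             return []
--         if n == 1: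
--             return [tensor_1[offset:offset + lengths[0]]]
--         mid = n // 2
--         left = lengths[:mid]
--         return rec(left, offset) + rec(lengths[mid:], offset + sum(left))
--     return rec(tensor_2, 0)
-- ===== Notes on version B (the rewrite author's own statement) =====
-- stated objective: alternative
-- what changed: Replaced A's linear stateful accumulator loop with a divide-and-conquer recursion that halves the length list and recurses on each half with the offset shifted by the left half's sum.
import Mathlib
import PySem

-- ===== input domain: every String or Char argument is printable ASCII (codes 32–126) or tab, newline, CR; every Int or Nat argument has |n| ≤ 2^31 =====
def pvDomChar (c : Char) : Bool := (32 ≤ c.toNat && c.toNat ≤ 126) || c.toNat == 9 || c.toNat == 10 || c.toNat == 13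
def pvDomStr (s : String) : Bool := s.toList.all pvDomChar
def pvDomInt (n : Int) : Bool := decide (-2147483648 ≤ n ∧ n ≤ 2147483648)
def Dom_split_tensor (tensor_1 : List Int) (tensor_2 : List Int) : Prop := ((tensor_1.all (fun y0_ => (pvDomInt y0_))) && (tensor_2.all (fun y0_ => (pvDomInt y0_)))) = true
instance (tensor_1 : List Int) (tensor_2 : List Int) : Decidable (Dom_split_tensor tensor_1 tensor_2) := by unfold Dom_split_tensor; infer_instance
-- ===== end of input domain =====

-- B replaces A's linear accumulator loop with a divide-and-conquer recursion on the
-- length list (objective: alternative decomposition, same exact behaviour).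

-- ===== PORT A =====
-- Port of A: fold carrying (result, start_index); each step slices tensor_1[start:start+length].
def split_tensor (tensor_1 : List Int) (tensor_2 : List Int) : List (List Int) :=
  (tensor_2.foldl
    (fun (st : List (List Int) × Int) (length : Int) =>
      let end_index := st.2 + length
      (st.1 ++ [PySem.List.slice tensor_1 (some st.2) (some end_index)], end_index))
    ([], 0)).1

-- ===== PORT B =====
-- rec(lengths, offset): empty → []; singleton → one slice; otherwise split at mid = n // 2
-- and recurse on each half, offsetting the right half by the left half's sum.
def pvRecB (tensor_1 : List Int) (lengths : List Int) (offset : Int) : List (List Int) :=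
  match lengths with
  | [] => []
  | [l] => [PySem.List.slice tensor_1 (some offset) (some (offset + l))]
  | l1 :: l2 :: rest =>
    let lengths' := l1 :: l2 :: rest
    let mid := lengths'.length / 2
    let left := lengths'.take mid
    pvRecB tensor_1 left offset ++
      pvRecB tensor_1 (lengths'.drop mid) (offset + left.sum)
  termination_by lengths.length
  decreasing_by
  · simp; omega
  · simp; omega

def split_tensor_alt (tensor_1 : List Int) (tensor_2 : List Int) : List (List Int) :=
  pvRecB tensor_1 tensor_2 0

-- ===== PRECONDITION & SPEC =====
def Spec_split_tensor (tensor_1 : List Int) (tensor_2 : List Int) (out : List (List Int)) : Prop := out = split_tensor_alt tensor_1 tensor_2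
instance (tensor_1 : List Int) (tensor_2 : List Int) (out : List (List Int)) : Decidable (Spec_split_tensor tensor_1 tensor_2 out) := by unfold Spec_split_tensor; infer_instance

-- ===== CLAIM (what is proved, stated in full; the proofs are below) =====
def Claim_equal_split_tensor : Prop := ∀ (tensor_1 : List Int) (tensor_2 : List Int), Dom_split_tensor tensor_1 tensor_2 → Spec_split_tensor tensor_1 tensor_2 (split_tensor tensor_1 tensor_2)

-- ===== LEMMAS AND PROOFS =====
-- Linear reference: the segments produced left to right from a given offset.
def pvLin (tensor_1 : List Int) : List Int → Int → List (List Int)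
  | [], _ => []
  | l :: rest, s => PySem.List.slice tensor_1 (some s) (some (s + l)) :: pvLin tensor_1 rest (s + l)

theorem pvLin_append (tensor_1 : List Int) (xs : List Int) :
    ∀ (ys : List Int) (s : Int),
      pvLin tensor_1 (xs ++ ys) s = pvLin tensor_1 xs s ++ pvLin tensor_1 ys (s + xs.sum) := by
  induction xs with
  | nil => intro ys s; simp [pvLin]
  | cons x xs ih =>
    intro ys s
    simp only [List.cons_append, pvLin, ih, List.sum_cons]
    rw [add_assoc]

theorem pvRecB_eq_lin (tensor_1 : List Int) (lengths : List Int) (offset : Int) :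
    pvRecB tensor_1 lengths offset = pvLin tensor_1 lengths offset := by
  induction lengths, offset using pvRecB.induct with
  | case1 _ => simp [pvRecB, pvLin]
  | case2 offset l => simp [pvRecB, pvLin]
  | case3 offset l1 l2 rest lengths' mid left ih1 ih2 =>
    rw [pvRecB]
    simp only [lengths', mid, left] at ih1 ih2
    rw [ih1, ih2]
    have h := pvLin_append tensor_1 ((l1 :: l2 :: rest).take ((l1 :: l2 :: rest).length / 2))
      ((l1 :: l2 :: rest).drop ((l1 :: l2 :: rest).length / 2)) offset
    rw [List.take_append_drop] at h
    exact h.symm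

theorem split_tensor_loop (tensor_1 : List Int) :
    ∀ (t2 : List Int) (acc : List (List Int)) (s : Int),
      (t2.foldl
        (fun (st : List (List Int) × Int) (length : Int) =>
          let end_index := st.2 + length
          (st.1 ++ [PySem.List.slice tensor_1 (some st.2) (some end_index)], end_index))
        (acc, s)).1
      = acc ++ pvLin tensor_1 t2 s := by
  intro t2
  induction t2 with
  | nil => intro acc s; simp [pvLin]
  | cons length rest ih =>
    intro acc s
    simp only [List.foldl_cons]
    rw [ih]
    simp [pvLin]

-- ===== VERDICT (by name: the statement is the Claim_ definition above) =====
theorem split_tensor_spec : Claim_equal_split_tensor := by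
  intro tensor_1 tensor_2 _
  show split_tensor tensor_1 tensor_2 = split_tensor_alt tensor_1 tensor_2
  unfold split_tensor split_tensor_alt
  rw [split_tensor_loop, pvRecB_eq_lin]
  simp
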